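-- pv_equiv track=rewrite | github.com/mtcorread/pdf-table-extractor | core/table_extractor.py | merge_tables_horizontally
-- ===== SOURCE A (Python) =====
-- def merge_tables_horizontally(tables):
--     """
--     Merge multiple tables by appending them horizontally.
--
--     Args:
--         tables: A list of table data (each table is a 2D list)
--
--     Returns:
--         list: The merged table data
--     """
--     if not tables:
--         return []
--
--     # Find the maximum row count across all tables
--     max_rows = max(len(table) for table in tables)
--
--     # Pad tables to have the same number of rows
--     padded_tables = []
--     for table in tables:
--         # Ensure all rows in the table have the same length
--         cols = max(len(row) for row in table) if table else 0
--         padded_table = [row + [''] * (cols - len(row)) for row in table]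
--
--         # Pad the table to have max_rows rows
--         padded_table.extend([[''] * cols for _ in range(max_rows - len(padded_table))])
--         padded_tables.append(padded_table)
--
--     # Merge the padded tables horizontally
--     merged = []
--     for row_idx in range(max_rows):
--         merged_row = []
--         for table in padded_tables:
--             merged_row.extend(table[row_idx])
--         merged.append(merged_row)
--
--     return merged
-- ===== SOURCE B (Python) =====
-- def merge_tables_horizontally(tables):
--     if not tables:
--         return []
--     max_rows = max(len(table) for table in tables)
--     widths = [max((len(row) for row in table), default=0) for table in tables]
--     merged = []
--     for row_idx in range(max_rows):
--         merged_row = []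
--         for table, cols in zip(tables, widths):
--             if row_idx < len(table):
--                 row = table[row_idx]
--                 merged_row.extend(row)
--                 merged_row.extend([''] * (cols - len(row)))
--             else:
--                 merged_row.extend([''] * cols)
--         merged.append(merged_row)
--     return merged
-- ===== Notes on version B (the rewrite author's own statement) =====
-- stated objective: simpler
-- what changed: B precomputes a widths list and builds each merged row in one fused pass by direct indexing of the original tables, never materializing A's intermediate padded_tables of padded/extended row copies.
import Mathlib
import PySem

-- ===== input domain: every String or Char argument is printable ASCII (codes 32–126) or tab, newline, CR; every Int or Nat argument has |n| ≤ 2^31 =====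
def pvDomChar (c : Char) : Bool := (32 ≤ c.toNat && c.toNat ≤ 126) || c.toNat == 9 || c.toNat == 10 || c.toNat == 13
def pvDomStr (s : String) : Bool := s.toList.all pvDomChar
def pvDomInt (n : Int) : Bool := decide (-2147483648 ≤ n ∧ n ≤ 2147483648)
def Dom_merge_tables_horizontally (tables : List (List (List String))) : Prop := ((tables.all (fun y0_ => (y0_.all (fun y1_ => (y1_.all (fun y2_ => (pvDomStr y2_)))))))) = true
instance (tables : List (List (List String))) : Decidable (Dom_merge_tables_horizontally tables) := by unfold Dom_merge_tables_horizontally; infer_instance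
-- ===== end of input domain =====

-- B builds each merged row in one fused pass over the original tables with a precomputed
-- widths list, never materializing A's intermediate padded_tables (objective: simpler).

-- ===== PORT A =====
def merge_tables_horizontally (tables : List (List (List String))) : List (List String) :=
  if tables = [] then []
  else
    let max_rows := (tables.map List.length).foldl Nat.max 0
    let padded_tables := tables.map (fun table =>
      let cols := if table = [] then 0 else (table.map List.length).foldl Nat.max 0
      let padded_table := table.map (fun row => row ++ List.replicate (cols - row.length) "")
      padded_table ++ List.replicate (max_rows - padded_table.length) (List.replicate cols ""))
    (List.range max_rows).map (fun row_idx =>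
      padded_tables.foldl (fun acc table => acc ++ table.getD row_idx []) [])

-- ===== PORT B =====
def merge_tables_horizontally_alt (tables : List (List (List String))) : List (List String) :=
  if tables = [] then []
  else
    let max_rows := (tables.map List.length).foldl Nat.max 0
    let widths := tables.map (fun table => (table.map List.length).foldl Nat.max 0)
    (List.range max_rows).map (fun row_idx =>
      (tables.zip widths).foldl (fun acc tc =>
        match tc.1[row_idx]? with
        | some row => acc ++ row ++ List.replicate (tc.2 - row.length) ""
        | none => acc ++ List.replicate tc.2 "") [])

-- ===== PRECONDITION & SPEC =====
def Spec_merge_tables_horizontally (tables : List (List (List String))) (out : List (List String)) : Prop := out = merge_tables_horizontally_alt tables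
instance (tables : List (List (List String))) (out : List (List String)) : Decidable (Spec_merge_tables_horizontally tables out) := by unfold Spec_merge_tables_horizontally; infer_instance

-- ===== CLAIM (what is proved, stated in full; the proofs are below) =====
def Claim_equal_merge_tables_horizontally : Prop := ∀ (tables : List (List (List String))), Dom_merge_tables_horizontally tables → Spec_merge_tables_horizontally tables (merge_tables_horizontally tables)

-- ===== LEMMAS AND PROOFS =====

-- A's empty-table guard on cols is redundant: the fold over [] is already 0.
theorem pv_cols_guard (t : List (List String)) :
    (if t = [] then 0 else (t.map List.length).foldl Nat.max 0)
      = (t.map List.length).foldl Nat.max 0 := by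
  cases t <;> simp

-- A's padded table, read at a row index below max_rows, yields exactly B's per-table contribution.
theorem pv_padded_getD (t : List (List String)) (cols max_rows i : ℕ) (hi : i < max_rows) :
    ((t.map (fun row => row ++ List.replicate (cols - row.length) ""))
      ++ List.replicate (max_rows - (t.map (fun row => row ++ List.replicate (cols - row.length) "")).length)
          (List.replicate cols "")).getD i []
    = (match t[i]? with
       | some row => row ++ List.replicate (cols - row.length) ""
       | none => List.replicate cols "") := by
  simp only [List.getD, List.length_map]
  by_cases h : i < t.length
  · rw [List.getElem?_append_left (by simpa using h)]
    simp [h]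
  · have hn : t[i]? = none := by
      simp only [List.getElem?_eq_none_iff]; omega
    rw [List.getElem?_append_right (by simpa using Nat.le_of_not_lt h)]
    simp only [List.length_map]
    rw [List.getElem?_replicate_of_lt (by omega)]
    simp [hn]

-- The two row-building folds agree for any accumulator, at any index below max_rows.
theorem pv_fold_eq (ts : List (List (List String))) (max_rows i : ℕ) (hi : i < max_rows)
    (acc : List String) :
    (ts.map (fun table =>
        let cols := if table = [] then 0 else (table.map List.length).foldl Nat.max 0
        let padded_table := table.map (fun row => row ++ List.replicate (cols - row.length) "")
        padded_table ++ List.replicate (max_rows - padded_table.length) (List.replicate cols ""))).foldl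
      (fun acc table => acc ++ table.getD i []) acc
    = (ts.zip (ts.map (fun table => (table.map List.length).foldl Nat.max 0))).foldl
        (fun acc tc =>
          match tc.1[i]? with
          | some row => acc ++ row ++ List.replicate (tc.2 - row.length) ""
          | none => acc ++ List.replicate tc.2 "") acc := by
  induction ts generalizing acc with
  | nil => simp
  | cons t ts ih =>
    simp only [List.map_cons, List.zip_cons_cons, List.foldl_cons]
    rw [ih]
    congr 1
    rw [pv_cols_guard, pv_padded_getD t _ max_rows i hi]
    cases t[i]? <;> simp

-- ===== VERDICT (by name: the statement is the Claim_ definition above) =====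
theorem merge_tables_horizontally_spec : Claim_equal_merge_tables_horizontally := by
  intro tables _
  unfold Spec_merge_tables_horizontally merge_tables_horizontally merge_tables_horizontally_alt
  by_cases h : tables = []
  · simp [h]
  · simp only [h]
    refine List.map_congr_left (fun i hi => ?_)
    exact pv_fold_eq tables _ i (List.mem_range.mp hi) []
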